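-- pv_equiv track=rewrite | github.com/SaiPavan93-zz/SVM-and-ECLAT-implementation | assign52.py | generate
-- ===== SOURCE A (Python) =====
-- def generate(a):
--     k=[]
--     for each in a:
--         l = [0] * 16
--         for j in each:
--             for n, i in enumerate(l):
--                 if (n == j - 1):
--                     l[n] = 1
--                 elif (i == 1):
--                     l[n] = 1
--                 else:
--                     l[n] = 0
--         k.append(l)
--     return(k)
-- ===== SOURCE B (Python) =====
-- def generate(a):
--     return [[1 if (n + 1) in set(each) else 0 for n in range(16)] for each in a]
-- ===== Notes on version B (the rewrite author's own statement) =====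
-- stated objective: simpler
-- what changed: Instead of rewriting the whole 16-slot vector once per element (scanning all 16 positions for every j), B builds a set of the element's indices and fills the vector in one pass over the 16 positions with a membership test, removing the inner 16-wide rewrite per element.
import Mathlib
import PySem

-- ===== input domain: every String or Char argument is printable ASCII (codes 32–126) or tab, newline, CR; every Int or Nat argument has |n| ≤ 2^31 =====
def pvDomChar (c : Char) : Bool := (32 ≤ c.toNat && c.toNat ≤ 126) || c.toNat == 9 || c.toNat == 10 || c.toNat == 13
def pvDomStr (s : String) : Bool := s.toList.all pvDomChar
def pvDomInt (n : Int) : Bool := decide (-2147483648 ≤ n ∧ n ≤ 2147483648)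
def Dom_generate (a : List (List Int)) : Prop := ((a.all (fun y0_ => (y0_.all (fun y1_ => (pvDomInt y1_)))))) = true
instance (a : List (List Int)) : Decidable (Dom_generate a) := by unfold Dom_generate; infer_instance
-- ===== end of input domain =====

-- B replaces A's per-element rewrite of the whole 16-slot vector by one membership-tested pass over the 16 positions (objective: simpler).

-- ===== PORT A =====
-- Python mutates l while iterating 'enumerate(l)', but each write targets exactly the
-- position just read, so the pass is exactly a map over the enumeration of the old list.
def pvStepA (l : List Int) (j : Int) : List Int :=
  (PySem.List.enumerate l).map (fun p => if p.1 = j - 1 then 1 else if p.2 = 1 then 1 else 0)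

def generate (a : List (List Int)) : List (List Int) :=
  a.foldl (fun k each => k ++ [each.foldl pvStepA (List.replicate 16 0)]) []

-- ===== PORT B =====
def generate_alt (a : List (List Int)) : List (List Int) :=
  a.map (fun each =>
    (PySem.List.pyRange 0 16 1).map (fun n =>
      if PySem.Set.contains (PySem.Set.ofList each) (n + 1) then 1 else 0))

-- ===== PRECONDITION & SPEC =====
def Spec_generate (a : List (List Int)) (out : List (List Int)) : Prop := out = generate_alt a
instance (a : List (List Int)) (out : List (List Int)) : Decidable (Spec_generate a out) := by unfold Spec_generate; infer_instance

-- ===== CLAIM (what is proved, stated in full; the proofs are below) =====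
def Claim_equal_generate : Prop := ∀ (a : List (List Int)), Dom_generate a → Spec_generate a (generate a)

-- ===== LEMMAS AND PROOFS =====

-- one A-step on a range-indexed vector, expressed pointwise
lemma pvStepA_map_range (g : Int → Int) (j : Int) :
    pvStepA ((PySem.List.pyRange 0 16 1).map g) j
      = (PySem.List.pyRange 0 16 1).map
          (fun n => if n = j - 1 then 1 else if g n = 1 then 1 else 0) := by
  unfold pvStepA
  rw [PySem.List.enumerate_eq_map_pyRange _ 0]
  simp only [List.map_map, PySem.List.len_eq, List.length_map, PySem.List.length_pyRange_one]
  norm_num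
  intro n hn0 hn16
  have hg : PySem.List.pyGetD ((PySem.List.pyRange 0 16 1).map g) n 0 = g n :=
    PySem.List.pyGetD_map_pyRange_of_nonneg g 16 n 0 hn0 hn16
  simp [hg]

-- the inner fold sets position n to 1 exactly when n+1 occurs in js
lemma pvFoldA_range (js : List Int) (g : Int → Int)
    (hg : ∀ n, g n = 0 ∨ g n = 1) :
    js.foldl pvStepA ((PySem.List.pyRange 0 16 1).map g)
      = (PySem.List.pyRange 0 16 1).map
          (fun n => if (n + 1) ∈ js then 1 else g n) := by
  induction js generalizing g with
  | nil => simp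
  | cons x js ih =>
    simp only [List.foldl_cons, pvStepA_map_range]
    rw [ih (fun n => if n = x - 1 then 1 else if g n = 1 then 1 else 0)
        (fun n => by by_cases h : n = x - 1 <;> rcases hg n with h0 | h0 <;> simp [h, h0])]
    apply List.map_congr_left
    intro n _
    by_cases h1 : n = x - 1 <;> by_cases h2 : (n + 1) ∈ js <;>
      rcases hg n with h0 | h0 <;>
      simp [h1, h2, h0, List.mem_cons]
    omega

lemma pvInner_eq (each : List Int) :
    each.foldl pvStepA (List.replicate 16 0)
      = (PySem.List.pyRange 0 16 1).map (fun n =>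
          if PySem.Set.contains (PySem.Set.ofList each) (n + 1) then 1 else 0) := by
  have hrep : (List.replicate 16 (0 : Int)) = (PySem.List.pyRange 0 16 1).map (fun _ => 0) := by
    decide
  rw [hrep, pvFoldA_range _ _ (fun _ => Or.inl rfl)]
  apply List.map_congr_left
  intro n _
  simp [PySem.Set.contains, PySem.Set.mem_ofList]

-- ===== VERDICT (by name: the statement is the Claim_ definition above) =====
theorem generate_spec : Claim_equal_generate := by
  intro a _
  unfold Spec_generate generate generate_alt
  rw [PySem.List.foldl_append_singleton_eq_map]
  exact List.map_congr_left (fun each _ => pvInner_eq each)
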